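-- pv_equiv track=rewrite | github.com/MrHarcombe/advent_of_code | 2022/day18b.py | get_enclosing
-- ===== SOURCE A (Python) =====
-- def get_enclosing(minx, miny, minz, maxx, maxy, maxz, lava):
--     enclosing = set()
--
--     # for dx, dy, dz in ((-1,0,0), (1,0,0), (0,-1,0), (0,1,0), (0,0,-1), (0,0,1)):
--     # go from minx to maxx, for all y and z
--     for y in range(miny, maxy+1):
--         for z in range(minz, maxz+1):
--             for x in range(minx, maxx+1):
--                 if (x,y,z) not in lava:
--                     enclosing.add((x,y,z))
--                 else:
--                     break
--
--     # go from maxx to minx, for all y and z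
--     for y in range(miny, maxy+1):
--         for z in range(minz, maxz+1):
--             for x in range(maxx, minx-1, -1):
--                 if (x,y,z) not in lava:
--                     enclosing.add((x,y,z))
--                 else:
--                     break
--
--     # go from miny to maxy, for all x and z
--     for x in range(minx, maxx+1):
--         for z in range(minz, maxz+1):
--             for y in range(miny, maxy+1):
--                 if (x,y,z) not in lava:
--                     enclosing.add((x,y,z))
--                 else:
--                     break
--     # go from maxy to miny, for all x and z
--     for x in range(minx, maxx+1):
--         for z in range(minz, maxz+1):
--             for y in range(maxy, miny-1, -1):
--                 if (x,y,z) not in lava: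
--                     enclosing.add((x,y,z))
--                 else:
--                     break
--
--     # go from minz to maxz, for all x and y
--     for x in range(minx, maxx+1):
--         for y in range(miny, maxy+1):
--             for z in range(minz, maxz+1):
--                 if (x,y,z) not in lava:
--                     enclosing.add((x,y,z))
--                 else:
--                     break
--     # go from maxz to minz, for all x and y
--     for x in range(minx, maxx+1):
--         for y in range(miny, maxy+1):
--             for z in range(maxz, minz-1, -1):
--                 if (x,y,z) not in lava:
--                     enclosing.add((x,y,z))
--                 else:
--                     break
--
--     return enclosing
-- ===== SOURCE B (Python) =====
-- def get_enclosing(minx, miny, minz, maxx, maxy, maxz, lava):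
--     enclosing = set()
--     # pass 1 (-x face): index the nearest lava per line once, then keep cells strictly before it
--     lo = {}
--     for (xx, yy, zz) in lava:
--         if minx <= xx:
--             lo[(yy, zz)] = min(lo.get((yy, zz), maxx + 1), xx)
--     for y in range(miny, maxy + 1):
--         for z in range(minz, maxz + 1):
--             bound = lo.get((y, z), maxx + 1)
--             enclosing.update((x, y, z) for x in range(minx, min(bound, maxx + 1)))
--     # pass 2 (+x face)
--     hi = {}
--     for (xx, yy, zz) in lava:
--         if xx <= maxx:
--             hi[(yy, zz)] = max(hi.get((yy, zz), minx - 1), xx)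
--     for y in range(miny, maxy + 1):
--         for z in range(minz, maxz + 1):
--             bound = hi.get((y, z), minx - 1)
--             enclosing.update((x, y, z) for x in range(maxx, max(bound, minx - 1), -1))
--     # pass 3 (-y face)
--     lo = {}
--     for (xx, yy, zz) in lava:
--         if miny <= yy:
--             lo[(xx, zz)] = min(lo.get((xx, zz), maxy + 1), yy)
--     for x in range(minx, maxx + 1):
--         for z in range(minz, maxz + 1):
--             bound = lo.get((x, z), maxy + 1)
--             enclosing.update((x, y, z) for y in range(miny, min(bound, maxy + 1)))
--     # pass 4 (+y face)
--     hi = {}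
--     for (xx, yy, zz) in lava:
--         if yy <= maxy:
--             hi[(xx, zz)] = max(hi.get((xx, zz), miny - 1), yy)
--     for x in range(minx, maxx + 1):
--         for z in range(minz, maxz + 1):
--             bound = hi.get((x, z), miny - 1)
--             enclosing.update((x, y, z) for y in range(maxy, max(bound, miny - 1), -1))
--     # pass 5 (-z face)
--     lo = {}
--     for (xx, yy, zz) in lava:
--         if minz <= zz:
--             lo[(xx, yy)] = min(lo.get((xx, yy), maxz + 1), zz)
--     for x in range(minx, maxx + 1):
--         for y in range(miny, maxy + 1):
--             bound = lo.get((x, y), maxz + 1)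
--             enclosing.update((x, y, z) for z in range(minz, min(bound, maxz + 1)))
--     # pass 6 (+z face)
--     hi = {}
--     for (xx, yy, zz) in lava:
--         if zz <= maxz:
--             hi[(xx, yy)] = max(hi.get((xx, yy), minz - 1), zz)
--     for x in range(minx, maxx + 1):
--         for y in range(miny, maxy + 1):
--             bound = hi.get((x, y), minz - 1)
--             enclosing.update((x, y, z) for z in range(maxz, max(bound, minz - 1), -1))
--     return enclosing
-- ===== Notes on version B (the rewrite author's own statement) =====
-- stated objective: alternative
-- what changed: A sweeps each grid line cell by cell, testing lava membership and breaking at the first lava block; B builds, once per pass, a dict mapping each line to its nearest lava coordinate (one scan of lava, min/max with a default just outside the box) and then emits each line's kept cells as a single range truncated at that bound, with no break and no per-cell membership test.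
import Mathlib
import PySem

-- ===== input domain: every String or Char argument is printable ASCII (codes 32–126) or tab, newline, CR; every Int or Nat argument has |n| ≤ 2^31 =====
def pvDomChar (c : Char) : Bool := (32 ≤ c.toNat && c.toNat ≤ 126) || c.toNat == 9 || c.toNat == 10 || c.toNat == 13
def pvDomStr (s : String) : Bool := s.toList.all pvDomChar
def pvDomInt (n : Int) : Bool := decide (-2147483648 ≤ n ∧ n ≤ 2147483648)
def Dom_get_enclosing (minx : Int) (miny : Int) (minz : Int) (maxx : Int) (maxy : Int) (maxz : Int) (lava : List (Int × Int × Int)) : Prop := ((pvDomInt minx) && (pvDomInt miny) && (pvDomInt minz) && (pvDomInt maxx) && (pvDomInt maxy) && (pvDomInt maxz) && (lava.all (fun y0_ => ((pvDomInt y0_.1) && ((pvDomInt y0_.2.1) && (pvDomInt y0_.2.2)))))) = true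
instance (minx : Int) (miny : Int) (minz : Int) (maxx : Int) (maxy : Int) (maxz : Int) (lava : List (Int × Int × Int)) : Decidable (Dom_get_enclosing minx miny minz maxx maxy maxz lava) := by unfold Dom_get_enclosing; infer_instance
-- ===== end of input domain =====

-- B replaces A's six break-on-first-lava scans with, per pass, a dict indexing each line's
-- nearest lava coordinate (built in one scan of lava, min/max with a default just outside the
-- box); cells strictly before that bound are kept by a plain comparison ('alternative' objective).

-- ===== PORT A =====
-- inner 'for t in range(...): if cell not in lava: add; else: break' loop of A
def pvGoBreak (lava : List (Int × Int × Int)) (mk : Int → Int × Int × Int)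
    (s : PySem.Set (Int × Int × Int)) : List Int → PySem.Set (Int × Int × Int)
  | [] => s
  | t :: rest =>
    if !(lava.contains (mk t)) then pvGoBreak lava mk (PySem.Set.add s (mk t)) rest
    else s

def get_enclosing (minx : Int) (miny : Int) (minz : Int) (maxx : Int) (maxy : Int) (maxz : Int) (lava : List (Int × Int × Int)) : List (Int × Int × Int) :=
  let s0 : PySem.Set (Int × Int × Int) := PySem.Set.empty
  -- go from minx to maxx, for all y and z
  let s1 := (PySem.List.pyRange miny (maxy+1) 1).foldl (fun s y =>
      (PySem.List.pyRange minz (maxz+1) 1).foldl (fun s z =>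
        pvGoBreak lava (fun x => (x, y, z)) s (PySem.List.pyRange minx (maxx+1) 1)) s) s0
  -- go from maxx to minx, for all y and z
  let s2 := (PySem.List.pyRange miny (maxy+1) 1).foldl (fun s y =>
      (PySem.List.pyRange minz (maxz+1) 1).foldl (fun s z =>
        pvGoBreak lava (fun x => (x, y, z)) s (PySem.List.pyRange maxx (minx-1) (-1))) s) s1
  -- go from miny to maxy, for all x and z
  let s3 := (PySem.List.pyRange minx (maxx+1) 1).foldl (fun s x =>
      (PySem.List.pyRange minz (maxz+1) 1).foldl (fun s z =>
        pvGoBreak lava (fun y => (x, y, z)) s (PySem.List.pyRange miny (maxy+1) 1)) s) s2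
  -- go from maxy to miny, for all x and z
  let s4 := (PySem.List.pyRange minx (maxx+1) 1).foldl (fun s x =>
      (PySem.List.pyRange minz (maxz+1) 1).foldl (fun s z =>
        pvGoBreak lava (fun y => (x, y, z)) s (PySem.List.pyRange maxy (miny-1) (-1))) s) s3
  -- go from minz to maxz, for all x and y
  let s5 := (PySem.List.pyRange minx (maxx+1) 1).foldl (fun s x =>
      (PySem.List.pyRange miny (maxy+1) 1).foldl (fun s y =>
        pvGoBreak lava (fun z => (x, y, z)) s (PySem.List.pyRange minz (maxz+1) 1)) s) s4
  -- go from maxz to minz, for all x and y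
  let s6 := (PySem.List.pyRange minx (maxx+1) 1).foldl (fun s x =>
      (PySem.List.pyRange miny (maxy+1) 1).foldl (fun s y =>
        pvGoBreak lava (fun z => (x, y, z)) s (PySem.List.pyRange maxz (minz-1) (-1))) s) s5
  s6

-- ===== PORT B =====
def get_enclosing_alt (minx : Int) (miny : Int) (minz : Int) (maxx : Int) (maxy : Int) (maxz : Int) (lava : List (Int × Int × Int)) : List (Int × Int × Int) :=
  let s0 : PySem.Set (Int × Int × Int) := PySem.Set.empty
  -- pass 1 (-x face): index the nearest lava per line once, then keep cells strictly before it
  let lo1 := lava.foldl (fun d c => if decide (minx ≤ c.1) then d.insert (c.2.1, c.2.2) (min (d.getD (c.2.1, c.2.2) (maxx+1)) c.1) else d) (∅ : PySem.Dict (Int × Int) Int)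
  let s1 := (PySem.List.pyRange miny (maxy+1) 1).foldl (fun s y =>
      (PySem.List.pyRange minz (maxz+1) 1).foldl (fun s z =>
        let bound := lo1.getD (y, z) (maxx+1)
        PySem.Set.update s ((PySem.List.pyRange minx (min bound (maxx+1)) 1).map (fun x => (x, y, z)))) s) s0
  -- pass 2 (+x face)
  let hi2 := lava.foldl (fun d c => if decide (c.1 ≤ maxx) then d.insert (c.2.1, c.2.2) (max (d.getD (c.2.1, c.2.2) (minx-1)) c.1) else d) (∅ : PySem.Dict (Int × Int) Int)
  let s2 := (PySem.List.pyRange miny (maxy+1) 1).foldl (fun s y =>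
      (PySem.List.pyRange minz (maxz+1) 1).foldl (fun s z =>
        let bound := hi2.getD (y, z) (minx-1)
        PySem.Set.update s ((PySem.List.pyRange maxx (max bound (minx-1)) (-1)).map (fun x => (x, y, z)))) s) s1
  -- pass 3 (-y face)
  let lo3 := lava.foldl (fun d c => if decide (miny ≤ c.2.1) then d.insert (c.1, c.2.2) (min (d.getD (c.1, c.2.2) (maxy+1)) c.2.1) else d) (∅ : PySem.Dict (Int × Int) Int)
  let s3 := (PySem.List.pyRange minx (maxx+1) 1).foldl (fun s x =>
      (PySem.List.pyRange minz (maxz+1) 1).foldl (fun s z =>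
        let bound := lo3.getD (x, z) (maxy+1)
        PySem.Set.update s ((PySem.List.pyRange miny (min bound (maxy+1)) 1).map (fun y => (x, y, z)))) s) s2
  -- pass 4 (+y face)
  let hi4 := lava.foldl (fun d c => if decide (c.2.1 ≤ maxy) then d.insert (c.1, c.2.2) (max (d.getD (c.1, c.2.2) (miny-1)) c.2.1) else d) (∅ : PySem.Dict (Int × Int) Int)
  let s4 := (PySem.List.pyRange minx (maxx+1) 1).foldl (fun s x =>
      (PySem.List.pyRange minz (maxz+1) 1).foldl (fun s z =>
        let bound := hi4.getD (x, z) (miny-1)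
        PySem.Set.update s ((PySem.List.pyRange maxy (max bound (miny-1)) (-1)).map (fun y => (x, y, z)))) s) s3
  -- pass 5 (-z face)
  let lo5 := lava.foldl (fun d c => if decide (minz ≤ c.2.2) then d.insert (c.1, c.2.1) (min (d.getD (c.1, c.2.1) (maxz+1)) c.2.2) else d) (∅ : PySem.Dict (Int × Int) Int)
  let s5 := (PySem.List.pyRange minx (maxx+1) 1).foldl (fun s x =>
      (PySem.List.pyRange miny (maxy+1) 1).foldl (fun s y =>
        let bound := lo5.getD (x, y) (maxz+1)
        PySem.Set.update s ((PySem.List.pyRange minz (min bound (maxz+1)) 1).map (fun z => (x, y, z)))) s) s4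
  -- pass 6 (+z face)
  let hi6 := lava.foldl (fun d c => if decide (c.2.2 ≤ maxz) then d.insert (c.1, c.2.1) (max (d.getD (c.1, c.2.1) (minz-1)) c.2.2) else d) (∅ : PySem.Dict (Int × Int) Int)
  let s6 := (PySem.List.pyRange minx (maxx+1) 1).foldl (fun s x =>
      (PySem.List.pyRange miny (maxy+1) 1).foldl (fun s y =>
        let bound := hi6.getD (x, y) (minz-1)
        PySem.Set.update s ((PySem.List.pyRange maxz (max bound (minz-1)) (-1)).map (fun z => (x, y, z)))) s) s5
  s6

-- ===== PRECONDITION & SPEC =====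
def Spec_get_enclosing (minx : Int) (miny : Int) (minz : Int) (maxx : Int) (maxy : Int) (maxz : Int) (lava : List (Int × Int × Int)) (out : List (Int × Int × Int)) : Prop := out = get_enclosing_alt minx miny minz maxx maxy maxz lava
instance (minx : Int) (miny : Int) (minz : Int) (maxx : Int) (maxy : Int) (maxz : Int) (lava : List (Int × Int × Int)) (out : List (Int × Int × Int)) : Decidable (Spec_get_enclosing minx miny minz maxx maxy maxz lava out) := by unfold Spec_get_enclosing; infer_instance

-- ===== CLAIM (what is proved, stated in full; the proofs are below) =====
def Claim_equal_get_enclosing : Prop := ∀ (minx : Int) (miny : Int) (minz : Int) (maxx : Int) (maxy : Int) (maxz : Int) (lava : List (Int × Int × Int)), Dom_get_enclosing minx miny minz maxx maxy maxz lava → Spec_get_enclosing minx miny minz maxx maxy maxz lava (get_enclosing minx miny minz maxx maxy maxz lava)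

-- ===== LEMMAS AND PROOFS =====

-- A's break loop is the fold of Set.add over the lava-free prefix
theorem pvGoBreak_eq_takeWhile (lava : List (Int × Int × Int)) (mk : Int → Int × Int × Int) :
    ∀ (xs : List Int) (s : PySem.Set (Int × Int × Int)),
      pvGoBreak lava mk s xs
        = ((xs.takeWhile (fun t => !(lava.contains (mk t)))).foldl
            (fun s t => PySem.Set.add s (mk t)) s) := by
  intro xs
  induction xs with
  | nil => intro s; rfl
  | cons t rest ih =>
    intro s
    by_cases h : mk t ∈ lava
    · simp [pvGoBreak, h]
    · simp [pvGoBreak, h, ih]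

-- on an ascending range, the lava-free prefix is exactly the cells whose whole
-- corridor back to the low end is lava-free
theorem takeWhile_pyRange_asc (q : Int → Bool) :
    ∀ (n : Nat) (a b : Int), (b - a).toNat = n →
      (PySem.List.pyRange a b 1).takeWhile q
        = (PySem.List.pyRange a b 1).filter (fun x => (PySem.List.pyRange a (x+1) 1).all q) := by
  intro n
  induction n with
  | zero =>
    intro a b h
    rw [PySem.List.pyRange_one_eq_nil (by omega)]
    rfl
  | succ m ih =>
    intro a b h
    have hab : a < b := by omega
    rw [PySem.List.pyRange_one_cons hab]
    have hhead : (PySem.List.pyRange a (a+1) 1).all q = q a := by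
      rw [PySem.List.pyRange_one_singleton]; simp
    by_cases hq : q a = true
    · rw [List.takeWhile_cons, List.filter_cons]
      simp only [hhead, hq]
      rw [ih (a+1) b (by omega)]
      refine congrArg (List.cons a) (List.filter_congr ?_)
      intro x hx
      have hx' := (PySem.List.mem_pyRange_one).1 hx
      rw [PySem.List.pyRange_one_cons (by omega : a < x + 1)]
      simp [hq]
    · rw [List.takeWhile_cons, List.filter_cons]
      simp only [hhead, hq]
      simp only [Bool.false_eq_true, if_false]
      symm
      rw [List.filter_eq_nil_iff]
      intro x hx
      have hx' := (PySem.List.mem_pyRange_one).1 hx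
      rw [PySem.List.pyRange_one_cons (by omega : a < x + 1)]
      simp [hq]

-- the descending counterpart: corridor toward the high end
theorem takeWhile_pyRange_desc (q : Int → Bool) :
    ∀ (n : Nat) (a b : Int), (a - b).toNat = n →
      (PySem.List.pyRange a b (-1)).takeWhile q
        = (PySem.List.pyRange a b (-1)).filter (fun x => (PySem.List.pyRange x (a+1) 1).all q) := by
  intro n
  induction n with
  | zero =>
    intro a b h
    rw [PySem.List.pyRange_neg_one_eq_nil (by omega)]
    rfl
  | succ m ih =>
    intro a b h
    have hab : b < a := by omega
    rw [PySem.List.pyRange_neg_one_cons hab]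
    have hhead : (PySem.List.pyRange a (a+1) 1).all q = q a := by
      rw [PySem.List.pyRange_one_singleton]; simp
    by_cases hq : q a = true
    · rw [List.takeWhile_cons, List.filter_cons]
      simp only [hhead, hq]
      rw [ih (a-1) b (by omega)]
      refine congrArg (List.cons a) (List.filter_congr ?_)
      intro x hx
      have hx' := (PySem.List.mem_pyRange_neg_one).1 hx
      have ha : a - 1 + 1 = a := by omega
      rw [ha, PySem.List.pyRange_one_succ_right (by omega : x ≤ a)]
      simp [hq]
    · rw [List.takeWhile_cons, List.filter_cons]
      simp only [hhead, hq]
      simp only [Bool.false_eq_true, if_false]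
      symm
      rw [List.filter_eq_nil_iff]
      intro x hx
      have hx' := (PySem.List.mem_pyRange_neg_one).1 hx
      rw [PySem.List.pyRange_one_succ_right (by omega : x ≤ a)]
      simp [hq]

-- B's per-line index, read at one key, is a plain fold of min/max over the matching lava
theorem getD_build (cond : Int × Int × Int → Bool) (keyf : Int × Int × Int → Int × Int)
    (g : Int → Int → Int) (proj : Int × Int × Int → Int) (d0 : Int) :
    ∀ (xs : List (Int × Int × Int)) (d : PySem.Dict (Int × Int) Int) (k : Int × Int),
      (xs.foldl (fun d c => if cond c then d.insert (keyf c) (g (d.getD (keyf c) d0) (proj c)) else d) d).getD k d0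
        = xs.foldl (fun acc c => if cond c && keyf c == k then g acc (proj c) else acc) (d.getD k d0) := by
  intro xs
  induction xs with
  | nil => intro d k; rfl
  | cons c rest ih =>
    intro d k
    simp only [List.foldl_cons]
    rw [ih]
    by_cases hc : cond c = true
    · simp only [hc, Bool.true_and, if_true]
      by_cases hk : keyf c = k
      · rw [PySem.Dict.getD_insert]
        simp [hk]
      · rw [PySem.Dict.getD_insert]
        simp [hk, Ne.symm hk]
    · simp [hc]

-- being below the min-fold, elementwise
theorem lt_foldl_min (proj : Int × Int × Int → Int) (P : Int × Int × Int → Bool) (t : Int) :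
    ∀ (xs : List (Int × Int × Int)) (init : Int),
      (t < xs.foldl (fun acc c => if P c then min acc (proj c) else acc) init)
        ↔ (t < init ∧ ∀ c ∈ xs, P c = true → t < proj c) := by
  intro xs
  induction xs with
  | nil => simp
  | cons c rest ih =>
    intro init
    simp only [List.foldl_cons, List.mem_cons]
    by_cases hc : P c = true
    · rw [ih]
      simp only [hc, if_true, lt_min_iff]
      constructor
      · rintro ⟨⟨h1, h2⟩, h3⟩
        exact ⟨h1, by rintro x (rfl | hx) hP; exacts [h2, h3 x hx hP]⟩
      · rintro ⟨h1, h2⟩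
        exact ⟨⟨h1, h2 c (Or.inl rfl) hc⟩, fun x hx hP => h2 x (Or.inr hx) hP⟩
    · rw [ih]
      simp only [hc]
      constructor
      · rintro ⟨h1, h2⟩
        exact ⟨h1, by rintro x (rfl | hx) hP; exacts [absurd hP hc, h2 x hx hP]⟩
      · rintro ⟨h1, h2⟩
        exact ⟨h1, fun x hx hP => h2 x (Or.inr hx) hP⟩

-- the max-fold being below, elementwise
theorem foldl_max_lt (proj : Int × Int × Int → Int) (P : Int × Int × Int → Bool) (t : Int) :
    ∀ (xs : List (Int × Int × Int)) (init : Int),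
      (xs.foldl (fun acc c => if P c then max acc (proj c) else acc) init < t)
        ↔ (init < t ∧ ∀ c ∈ xs, P c = true → proj c < t) := by
  intro xs
  induction xs with
  | nil => simp
  | cons c rest ih =>
    intro init
    simp only [List.foldl_cons, List.mem_cons]
    by_cases hc : P c = true
    · rw [ih]
      simp only [hc, if_true, max_lt_iff]
      constructor
      · rintro ⟨⟨h1, h2⟩, h3⟩
        exact ⟨h1, by rintro x (rfl | hx) hP; exacts [h2, h3 x hx hP]⟩
      · rintro ⟨h1, h2⟩
        exact ⟨⟨h1, h2 c (Or.inl rfl) hc⟩, fun x hx hP => h2 x (Or.inr hx) hP⟩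
    · rw [ih]
      simp only [hc]
      constructor
      · rintro ⟨h1, h2⟩
        exact ⟨h1, by rintro x (rfl | hx) hP; exacts [absurd hP hc, h2 x hx hP]⟩
      · rintro ⟨h1, h2⟩
        exact ⟨h1, fun x hx hP => h2 x (Or.inr hx) hP⟩

-- filtering an ascending range below a bound clips its upper end
theorem filter_lt_pyRange_asc (m : Int) :
    ∀ (n : Nat) (a b : Int), (b - a).toNat = n →
      (PySem.List.pyRange a b 1).filter (fun x => decide (x < m)) = PySem.List.pyRange a (min m b) 1 := by
  intro n
  induction n with
  | zero =>
    intro a b h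
    rw [PySem.List.pyRange_one_eq_nil (by omega), PySem.List.pyRange_one_eq_nil (by omega : min m b ≤ a)]
    rfl
  | succ k ih =>
    intro a b h
    have hab : a < b := by omega
    rw [PySem.List.pyRange_one_cons hab, List.filter_cons]
    by_cases hm : a < m
    · simp only [hm, decide_true, if_true]
      rw [ih (a+1) b (by omega), PySem.List.pyRange_one_cons (by omega : a < min m b)]
    · simp only [hm, decide_false, Bool.false_eq_true, if_false]
      rw [PySem.List.pyRange_one_eq_nil (by omega : min m b ≤ a), List.filter_eq_nil_iff.mpr]
      intro x hx
      have := (PySem.List.mem_pyRange_one).1 hx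
      simp; omega
-- filtering a descending range above a bound clips its lower end
theorem filter_gt_pyRange_desc (m : Int) :
    ∀ (n : Nat) (a b : Int), (a - b).toNat = n →
      (PySem.List.pyRange a b (-1)).filter (fun x => decide (m < x)) = PySem.List.pyRange a (max m b) (-1) := by
  intro n
  induction n with
  | zero =>
    intro a b h
    rw [PySem.List.pyRange_neg_one_eq_nil (by omega), PySem.List.pyRange_neg_one_eq_nil (by omega : a ≤ max m b)]
    rfl
  | succ k ih =>
    intro a b h
    have hab : b < a := by omega
    rw [PySem.List.pyRange_neg_one_cons hab, List.filter_cons]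
    by_cases hm : m < a
    · simp only [hm, decide_true, if_true]
      rw [ih (a-1) b (by omega), PySem.List.pyRange_neg_one_cons (by omega : max m b < a)]
    · simp only [hm, decide_false, Bool.false_eq_true, if_false]
      rw [PySem.List.pyRange_neg_one_eq_nil (by omega : a ≤ max m b), List.filter_eq_nil_iff.mpr]
      intro x hx
      have := (PySem.List.mem_pyRange_neg_one).1 hx
      simp; omega

-- B's per-cell bound test equals A's corridor test, ascending corridor [lo, t]
theorem bound_asc (lava : List (Int × Int × Int)) (mk : Int → Int × Int × Int)
    (keyf : Int × Int × Int → Int × Int) (proj : Int × Int × Int → Int) (k : Int × Int)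
    (hm : ∀ c t, c = mk t ↔ (keyf c = k ∧ proj c = t)) (lo hi t : Int) (ht : t ≤ hi) :
    decide (t < lava.foldl (fun acc c => if decide (lo ≤ proj c) && keyf c == k then min acc (proj c) else acc) (hi+1))
      = (PySem.List.pyRange lo (t+1) 1).all (fun tt => !(lava.contains (mk tt))) := by
  rw [Bool.eq_iff_iff, decide_eq_true_eq, lt_foldl_min]
  simp only [List.all_eq_true, PySem.List.mem_pyRange_one, Bool.not_eq_true', List.contains_eq_mem,
    decide_eq_false_iff_not, Bool.and_eq_true, decide_eq_true_eq, beq_iff_eq]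
  constructor
  · rintro ⟨_, h⟩ tt ⟨h1, h2⟩ hmem
    have hl := (hm (mk tt) tt).mp rfl
    have := h (mk tt) hmem ⟨by rw [hl.2]; exact h1, hl.1⟩
    omega
  · intro h
    refine ⟨by omega, ?_⟩
    rintro c hc ⟨hlo, hk⟩
    by_contra hle
    exact h (proj c) ⟨hlo, by omega⟩ ((hm c (proj c)).mpr ⟨hk, rfl⟩ ▸ hc)

-- descending corridor [t, hi]
theorem bound_desc (lava : List (Int × Int × Int)) (mk : Int → Int × Int × Int)
    (keyf : Int × Int × Int → Int × Int) (proj : Int × Int × Int → Int) (k : Int × Int)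
    (hm : ∀ c t, c = mk t ↔ (keyf c = k ∧ proj c = t)) (lo hi t : Int) (ht : lo ≤ t) :
    decide (lava.foldl (fun acc c => if decide (proj c ≤ hi) && keyf c == k then max acc (proj c) else acc) (lo-1) < t)
      = (PySem.List.pyRange t (hi+1) 1).all (fun tt => !(lava.contains (mk tt))) := by
  rw [Bool.eq_iff_iff, decide_eq_true_eq, foldl_max_lt]
  simp only [List.all_eq_true, PySem.List.mem_pyRange_one, Bool.not_eq_true', List.contains_eq_mem,
    decide_eq_false_iff_not, Bool.and_eq_true, decide_eq_true_eq, beq_iff_eq]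
  constructor
  · rintro ⟨_, h⟩ tt ⟨h1, h2⟩ hmem
    have hl := (hm (mk tt) tt).mp rfl
    have := h (mk tt) hmem ⟨by rw [hl.2]; omega, hl.1⟩
    omega
  · intro h
    refine ⟨by omega, ?_⟩
    rintro c hc ⟨hhi, hk⟩
    by_contra hle
    exact h (proj c) ⟨by omega, by omega⟩ ((hm c (proj c)).mpr ⟨hk, rfl⟩ ▸ hc)

-- one ascending A-sweep equals the corresponding B pass
theorem sweep_asc (lava : List (Int × Int × Int)) (l1 l2 : List Int) (lo hi : Int)
    (mk : Int → Int → Int → Int × Int × Int) (keyf : Int × Int × Int → Int × Int)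
    (proj : Int × Int × Int → Int)
    (hm : ∀ u v c t, c = mk u v t ↔ (keyf c = (u, v) ∧ proj c = t))
    (s : PySem.Set (Int × Int × Int)) :
    l1.foldl (fun s u => l2.foldl (fun s v =>
        pvGoBreak lava (fun t => mk u v t) s (PySem.List.pyRange lo (hi+1) 1)) s) s
      = l1.foldl (fun s u => l2.foldl (fun s v =>
          PySem.Set.update s ((PySem.List.pyRange lo (min ((lava.foldl (fun d c => if decide (lo ≤ proj c) then d.insert (keyf c) (min (d.getD (keyf c) (hi+1)) (proj c)) else d) (∅ : PySem.Dict (Int × Int) Int)).getD (u, v) (hi+1)) (hi+1)) 1).map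
              (fun t => mk u v t))) s) s := by
  refine PySem.List.foldl_congr_mem _ _ _ _ ?_
  intro s' u _
  refine PySem.List.foldl_congr_mem _ _ _ _ ?_
  intro s'' v _
  rw [pvGoBreak_eq_takeWhile, takeWhile_pyRange_asc _ ((hi+1) - lo).toNat lo (hi+1) rfl]
  show _ = (List.map _ _).foldl PySem.Set.add s''
  rw [List.foldl_map, ← filter_lt_pyRange_asc _ ((hi+1) - lo).toNat lo (hi+1) rfl]
  refine congrArg (fun l => List.foldl _ s'' l) (List.filter_congr ?_)
  intro t htm
  have ht := (PySem.List.mem_pyRange_one).1 htm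
  rw [getD_build]
  have he : ((∅ : PySem.Dict (Int × Int) Int).getD (u, v) (hi+1)) = hi+1 := rfl
  rw [he]
  exact (bound_asc lava (mk u v) keyf proj (u, v) (hm u v) lo hi t (by omega)).symm

-- one descending A-sweep equals the corresponding B pass
theorem sweep_desc (lava : List (Int × Int × Int)) (l1 l2 : List Int) (lo hi : Int)
    (mk : Int → Int → Int → Int × Int × Int) (keyf : Int × Int × Int → Int × Int)
    (proj : Int × Int × Int → Int)
    (hm : ∀ u v c t, c = mk u v t ↔ (keyf c = (u, v) ∧ proj c = t))
    (s : PySem.Set (Int × Int × Int)) :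
    l1.foldl (fun s u => l2.foldl (fun s v =>
        pvGoBreak lava (fun t => mk u v t) s (PySem.List.pyRange hi (lo-1) (-1))) s) s
      = l1.foldl (fun s u => l2.foldl (fun s v =>
          PySem.Set.update s ((PySem.List.pyRange hi (max ((lava.foldl (fun d c => if decide (proj c ≤ hi) then d.insert (keyf c) (max (d.getD (keyf c) (lo-1)) (proj c)) else d) (∅ : PySem.Dict (Int × Int) Int)).getD (u, v) (lo-1)) (lo-1)) (-1)).map
              (fun t => mk u v t))) s) s := by
  refine PySem.List.foldl_congr_mem _ _ _ _ ?_
  intro s' u _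
  refine PySem.List.foldl_congr_mem _ _ _ _ ?_
  intro s'' v _
  rw [pvGoBreak_eq_takeWhile, takeWhile_pyRange_desc _ (hi - (lo-1)).toNat hi (lo-1) rfl]
  show _ = (List.map _ _).foldl PySem.Set.add s''
  rw [List.foldl_map, ← filter_gt_pyRange_desc _ (hi - (lo-1)).toNat hi (lo-1) rfl]
  refine congrArg (fun l => List.foldl _ s'' l) (List.filter_congr ?_)
  intro t htm
  have ht := (PySem.List.mem_pyRange_neg_one).1 htm
  rw [getD_build]
  have he : ((∅ : PySem.Dict (Int × Int) Int).getD (u, v) (lo-1)) = lo-1 := rfl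
  rw [he]
  exact (bound_desc lava (mk u v) keyf proj (u, v) (hm u v) lo hi t (by omega)).symm

-- ===== VERDICT (by name: the statement is the Claim_ definition above) =====
theorem get_enclosing_spec : Claim_equal_get_enclosing := by
  intro minx miny minz maxx maxy maxz lava _
  unfold Spec_get_enclosing
  simp only [get_enclosing, get_enclosing_alt]
  rw [sweep_asc lava _ _ minx maxx (fun u v t => (t, u, v))
        (fun c => (c.2.1, c.2.2)) (fun c => c.1)
        (by rintro u v ⟨a, b, c⟩ t; simp [Prod.ext_iff]; tauto)]
  rw [sweep_desc lava _ _ minx maxx (fun u v t => (t, u, v))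
        (fun c => (c.2.1, c.2.2)) (fun c => c.1)
        (by rintro u v ⟨a, b, c⟩ t; simp [Prod.ext_iff]; tauto)]
  rw [sweep_asc lava _ _ miny maxy (fun u v t => (u, t, v))
        (fun c => (c.1, c.2.2)) (fun c => c.2.1)
        (by rintro u v ⟨a, b, c⟩ t; simp [Prod.ext_iff]; tauto)]
  rw [sweep_desc lava _ _ miny maxy (fun u v t => (u, t, v))
        (fun c => (c.1, c.2.2)) (fun c => c.2.1)
        (by rintro u v ⟨a, b, c⟩ t; simp [Prod.ext_iff]; tauto)]
  rw [sweep_asc lava _ _ minz maxz (fun u v t => (u, v, t))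
        (fun c => (c.1, c.2.1)) (fun c => c.2.2)
        (by rintro u v ⟨a, b, c⟩ t; simp [Prod.ext_iff]; tauto)]
  rw [sweep_desc lava _ _ minz maxz (fun u v t => (u, v, t))
        (fun c => (c.1, c.2.1)) (fun c => c.2.2)
        (by rintro u v ⟨a, b, c⟩ t; simp [Prod.ext_iff]; tauto)]
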